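-- pv_equiv track=rewrite | github.com/Accelergy-Project/timeloop-python | pytimeloop/fastfusion/mapper/level_mapper/helper.py | gather_relevant_boundary_idxs
-- ===== SOURCE A (Python) =====
-- def gather_relevant_boundary_idxs(ranks, relevant_ranks):
--     idxs = []
--     last_is_relevant = True
--     for i, r in enumerate(ranks):
--         is_relevant = r in relevant_ranks
--         if last_is_relevant and not is_relevant:
--             idxs.append(i)
--         last_is_relevant = is_relevant
--     if last_is_relevant:
--         idxs.append(len(ranks))
--     return idxs
-- ===== SOURCE B (Python) =====
-- def gather_relevant_boundary_idxs(ranks, relevant_ranks):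
--     irr = {i for i, r in enumerate(ranks) if r not in relevant_ranks}
--     out = sorted(i for i in irr if i - 1 not in irr)
--     if len(ranks) - 1 not in irr:
--         out.append(len(ranks))
--     return out
-- ===== Notes on version B (the rewrite author's own statement) =====
-- stated objective: alternative
-- what changed: Instead of a sequential scan carrying a last_is_relevant flag, B builds the set of irrelevant positions and computes run starts by random-access neighbour membership (i in set, i-1 not in set), sorting the result and appending len(ranks) when the last position is not irrelevant.
import Mathlib
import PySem

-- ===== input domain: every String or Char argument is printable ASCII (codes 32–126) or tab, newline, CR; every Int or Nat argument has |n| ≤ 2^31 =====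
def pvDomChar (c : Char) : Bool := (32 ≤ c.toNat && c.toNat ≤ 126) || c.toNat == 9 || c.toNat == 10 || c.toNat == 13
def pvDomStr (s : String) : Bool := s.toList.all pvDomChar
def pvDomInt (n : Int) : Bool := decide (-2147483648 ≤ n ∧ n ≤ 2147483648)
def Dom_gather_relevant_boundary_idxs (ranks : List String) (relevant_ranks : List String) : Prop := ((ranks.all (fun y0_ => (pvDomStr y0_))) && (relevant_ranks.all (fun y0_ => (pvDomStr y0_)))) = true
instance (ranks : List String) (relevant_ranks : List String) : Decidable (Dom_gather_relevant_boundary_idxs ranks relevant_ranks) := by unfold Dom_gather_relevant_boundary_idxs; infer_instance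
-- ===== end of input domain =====

-- B replaces A's stateful left-to-right scan by a set of irrelevant positions
-- queried by neighbour membership (alternative algorithm, same asymptotic cost).
-- Both programs are total.

-- ===== PORT A =====
-- the for-loop: state = (index i, last_is_relevant, idxs accumulator); returns final (last_is_relevant, idxs)
def gatherA_go (relevant_ranks : List String) : List String → Int → Bool → List Int → Bool × List Int
  | [], _, last, idxs => (last, idxs)
  | r :: rest, i, last, idxs =>
      let isr := relevant_ranks.contains r       -- r in relevant_ranks
      gatherA_go relevant_ranks rest (i + 1) isr (if last && !isr then idxs ++ [i] else idxs)

def gather_relevant_boundary_idxs (ranks : List String) (relevant_ranks : List String) : List Int :=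
  let res := gatherA_go relevant_ranks ranks 0 true []
  if res.1 then res.2 ++ [(ranks.length : Int)] else res.2

-- ===== PORT B =====
def gather_relevant_boundary_idxs_alt (ranks : List String) (relevant_ranks : List String) : List Int :=
  -- irr = {i for i, r in enumerate(ranks) if r not in relevant_ranks}
  let irr : PySem.Set Int :=
    PySem.Set.ofList (((PySem.List.enumerate ranks 0).filter
      (fun p => !(relevant_ranks.contains p.2))).map (fun p => p.1))
  -- out = sorted(i for i in irr if i - 1 not in irr)   (sorted without key: order-independent)
  let out := PySem.List.sorted (irr.filter (fun i => !(PySem.Set.contains irr (i - 1)))) (fun x => x) false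
  -- if len(ranks) - 1 not in irr: out.append(len(ranks))
  if !(PySem.Set.contains irr ((ranks.length : Int) - 1)) then out ++ [(ranks.length : Int)] else out

-- ===== PRECONDITION & SPEC =====
def Spec_gather_relevant_boundary_idxs (ranks : List String) (relevant_ranks : List String) (out : List Int) : Prop := out = gather_relevant_boundary_idxs_alt ranks relevant_ranks
instance (ranks : List String) (relevant_ranks : List String) (out : List Int) : Decidable (Spec_gather_relevant_boundary_idxs ranks relevant_ranks out) := by unfold Spec_gather_relevant_boundary_idxs; infer_instance

-- ===== CLAIM (what is proved, stated in full; the proofs are below) =====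
def Claim_equal_gather_relevant_boundary_idxs : Prop := ∀ (ranks : List String) (relevant_ranks : List String), Dom_gather_relevant_boundary_idxs ranks relevant_ranks → Spec_gather_relevant_boundary_idxs ranks relevant_ranks (gather_relevant_boundary_idxs ranks relevant_ranks)

-- ===== LEMMAS AND PROOFS =====

-- proof-side characterisation of A: transition indices of (last :: bs ++ [false]) starting at i
def pvScan : Bool → List Bool → Int → List Int
  | last, [], i => if last then [i] else []
  | last, b :: rest, i => (if last && !b then [i] else []) ++ pvScan b rest (i + 1)

-- proof-side characterisation of B's set: positions (from i) whose flag is false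
def pvIdx : List Bool → Int → List Int
  | [], _ => []
  | b :: bs, i => (if b then [] else [i]) ++ pvIdx bs (i + 1)

-- relevance of the final element (sentinel 'last' for the empty list)
def pvLast : Bool → List Bool → Bool
  | last, [] => last
  | _, b :: bs => pvLast b bs

theorem gatherA_go_scan (relevant : List String) (rs : List String) (i : Int) (last : Bool) (acc : List Int) :
    (if (gatherA_go relevant rs i last acc).1
      then (gatherA_go relevant rs i last acc).2 ++ [i + (rs.length : Int)]
      else (gatherA_go relevant rs i last acc).2)
    = acc ++ pvScan last (rs.map (fun r => relevant.contains r)) i := by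
  induction rs generalizing i last acc with
  | nil => simp [gatherA_go, pvScan]; split <;> simp
  | cons r rest ih =>
      simp only [gatherA_go, List.map_cons, pvScan]
      have h := ih (i + 1) (relevant.contains r) (if last && !(relevant.contains r) then acc ++ [i] else acc)
      have hlen : i + ((r :: rest).length : Int) = (i + 1) + (rest.length : Int) := by
        simp [List.length_cons]; ring
      rw [hlen, h]
      split <;> simp

theorem mem_pvIdx_ge (bs : List Bool) (i j : Int) (h : j ∈ pvIdx bs i) : i ≤ j := by
  induction bs generalizing i with
  | nil => simp [pvIdx] at h
  | cons b bs ih =>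
      simp only [pvIdx, List.mem_append] at h
      rcases h with h | h
      · split at h <;> simp_all
      · have := ih (i + 1) h; omega

theorem pairwise_pvIdx (bs : List Bool) (i : Int) : (pvIdx bs i).Pairwise (· < ·) := by
  induction bs generalizing i with
  | nil => simp [pvIdx]
  | cons b bs ih =>
      simp only [pvIdx]
      refine List.pairwise_append.mpr ⟨?_, ih (i + 1), ?_⟩
      · split <;> simp
      · intro x hx y hy
        have hy' := mem_pvIdx_ge bs (i + 1) y hy
        cases b with
        | true => simp at hx
        | false => simp at hx; omega

theorem enum_filter_map (rel : List String) (rs : List String) (i : Int) :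
    ((PySem.List.enumerate rs i).filter (fun p => !(rel.contains p.2))).map (fun p => p.1)
    = pvIdx (rs.map (fun r => rel.contains r)) i := by
  induction rs generalizing i with
  | nil => simp [PySem.List.enumerate_nil, pvIdx]
  | cons r rest ih =>
      by_cases hr : r ∈ rel
      · simpa [PySem.List.enumerate_cons, pvIdx, hr] using ih (i + 1)
      · simpa [PySem.List.enumerate_cons, pvIdx, hr] using ih (i + 1)

theorem tail_cond (bs : List Bool) (i : Int) :
    ((pvIdx bs i).contains (i + (bs.length : Int) - 1) = false) ↔ pvLast true bs = true := by
  induction bs generalizing i with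
  | nil => simp [pvIdx, pvLast]
  | cons b bs ih =>
      cases bs with
      | nil => cases b <;> simp [pvIdx, pvLast]
      | cons c cs =>
          have hlast : pvLast true (b :: c :: cs) = pvLast true (c :: cs) := by
            cases b <;> simp [pvLast]
          have htgt : i + ((b :: c :: cs).length : Int) - 1
              = (i + 1) + ((c :: cs).length : Int) - 1 := by
            push_cast [List.length_cons]; ring
          have hne : (i + 1) + ((c :: cs).length : Int) - 1 ≠ i := by
            push_cast [List.length_cons]; omega
          rw [htgt, hlast, ← ih (i + 1)]
          cases b with
          | true => simp [pvIdx]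
          | false =>
              simp [pvIdx]
              intro _ _
              omega

theorem scan_eq_filter (bs : List Bool) (i : Int) (last : Bool) :
    pvScan last bs i
    = ((pvIdx bs i).filter
        (fun j => if j = i then last else !((pvIdx bs i).contains (j - 1))))
      ++ (if pvLast last bs then [i + (bs.length : Int)] else []) := by
  induction bs generalizing i last with
  | nil => simp [pvScan, pvIdx, pvLast]
  | cons b bs ih =>
      have hlen : i + ((b :: bs).length : Int) = (i + 1) + (bs.length : Int) := by
        push_cast [List.length_cons]; ring
      have hnm : i ∉ pvIdx bs (i + 1) :=
        fun hm => absurd (mem_pvIdx_ge bs (i + 1) _ hm) (by omega)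
      have h11 : (i + 1 - 1 : Int) = i := by ring
      cases b with
      | true =>
          have hidx : pvIdx (true :: bs) i = pvIdx bs (i + 1) := by simp [pvIdx]
          have hP : ∀ j ∈ pvIdx bs (i + 1),
              (if j = i then last else !((pvIdx bs (i + 1)).contains (j - 1)))
              = (if j = i + 1 then true else !((pvIdx bs (i + 1)).contains (j - 1))) := by
            intro j hj
            have hj1 := mem_pvIdx_ge bs (i + 1) j hj
            have hji : j ≠ i := by omega
            by_cases hj2 : j = i + 1
            · subst hj2; simp [hji, h11, hnm]
            · simp [hji, hj2]
          have hstep : pvScan last (true :: bs) i = pvScan true bs (i + 1) := by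
            cases last <;> simp [pvScan]
          rw [hstep, ih (i + 1) true, hidx, hlen,
            show pvLast last (true :: bs) = pvLast true bs from rfl]
          rw [List.filter_congr hP]
      | false =>
          have hidx : pvIdx (false :: bs) i = i :: pvIdx bs (i + 1) := by simp [pvIdx]
          have hP : ∀ j ∈ pvIdx bs (i + 1),
              (if j = i then last else !((i :: pvIdx bs (i + 1)).contains (j - 1)))
              = (if j = i + 1 then false else !((pvIdx bs (i + 1)).contains (j - 1))) := by
            intro j hj
            have hj1 := mem_pvIdx_ge bs (i + 1) j hj
            have hji : j ≠ i := by omega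
            by_cases hj2 : j = i + 1
            · subst hj2; simp [hji, h11]
            · have hne1 : j - 1 ≠ i := by omega
              simp [hji, hj2, hne1]
          have hstep : pvScan last (false :: bs) i
              = (if last then [i] else []) ++ pvScan false bs (i + 1) := by
            cases last <;> simp [pvScan]
          rw [hstep, ih (i + 1) false, hidx, hlen,
            show pvLast last (false :: bs) = pvLast false bs from rfl,
            List.filter_cons]
          have hPi : ((if (i : Int) = i then last else !((i :: pvIdx bs (i + 1)).contains (i - 1))) = true)
              = (last = true) := by simp
          rw [List.filter_congr hP]
          cases last <;> simp

-- ===== VERDICT (by name: the statement is the Claim_ definition above) =====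
theorem gather_relevant_boundary_idxs_spec : Claim_equal_gather_relevant_boundary_idxs := by
  intro ranks relevant _
  unfold Spec_gather_relevant_boundary_idxs gather_relevant_boundary_idxs gather_relevant_boundary_idxs_alt
  have hA := gatherA_go_scan relevant ranks 0 true []
  simp only [zero_add, List.nil_append] at hA
  simp only []
  rw [hA]
  set rel := ranks.map (fun r => relevant.contains r) with hrel
  have hlen : (ranks.length : Int) = (rel.length : Int) := by simp [hrel]
  have hset : PySem.Set.ofList (((PySem.List.enumerate ranks 0).filter
      (fun p => !(relevant.contains p.2))).map (fun p => p.1)) = pvIdx rel 0 := by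
    rw [enum_filter_map relevant ranks 0]
    exact PySem.Set.ofList_eq_self_of_nodup _
      ((pairwise_pvIdx rel 0).imp (fun h => ne_of_lt h))
  rw [hset]
  have hsorted : PySem.List.sorted ((pvIdx rel 0).filter
      (fun i => !(PySem.Set.contains (pvIdx rel 0) (i - 1)))) (fun x => x) false
      = (pvIdx rel 0).filter (fun i => !(PySem.Set.contains (pvIdx rel 0) (i - 1))) := by
    apply PySem.List.sorted_eq_of_perm_of_pairwise_lt _ _ _ (List.Perm.refl _)
    exact (pairwise_pvIdx rel 0).filter _
  rw [hsorted]
  have hfilter : (pvIdx rel 0).filter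
      (fun j => if j = (0 : Int) then true else !((pvIdx rel 0).contains (j - 1)))
      = (pvIdx rel 0).filter (fun i => !(PySem.Set.contains (pvIdx rel 0) (i - 1))) := by
    apply List.filter_congr
    intro j hj
    have hj0 := mem_pvIdx_ge rel 0 j hj
    by_cases hj' : j = (0 : Int)
    · subst hj'
      have hm1 : ((-1 : Int)) ∉ pvIdx rel 0 :=
        fun hm => absurd (mem_pvIdx_ge rel 0 _ hm) (by omega)
      simp [PySem.Set.contains, hm1]
    · simp [hj', PySem.Set.contains]
  rw [scan_eq_filter rel 0 true, hfilter]
  have hztgt : (0 : Int) + (rel.length : Int) - 1 = (rel.length : Int) - 1 := by ring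
  by_cases hmem : ((rel.length : Int) - 1) ∈ pvIdx rel 0
  · have hcont : ¬ ((pvIdx rel 0).contains ((0 : Int) + (rel.length : Int) - 1) = false) := by
      rw [hztgt]; simp [hmem]
    have hl : pvLast true rel = false := by
      cases hpl : pvLast true rel
      · rfl
      · exact absurd ((tail_cond rel 0).mpr hpl) hcont
    rw [hlen]
    simp [hl, PySem.Set.contains, hmem]
  · have hcont : (pvIdx rel 0).contains ((0 : Int) + (rel.length : Int) - 1) = false := by
      rw [hztgt]; simp [hmem]
    have hl : pvLast true rel = true := (tail_cond rel 0).mp hcont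
    rw [hlen]
    simp [hl, PySem.Set.contains, hmem]
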